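-- pv_equiv track=rewrite | github.com/miliar/Code_Jam_Webscraper | solutions_python/Problem_156/534.py | splitdownto
-- ===== SOURCE A (Python) =====
-- def splitdownto(eat, ps):
-- 	plates = list(ps)
-- 	i = 0
-- 	splits = 0
-- 	while i < len(plates):
-- 		if plates[i] > eat:
-- 			plates.append(plates[i] - eat)
-- 			plates [i] = eat
-- 			splits+=1
-- 		i+=1
-- 	return splits + max (plates)
-- ===== SOURCE B (Python) =====
-- def splitdownto(eat, ps):
--     splits = sum((p - 1) // eat for p in ps if p > eat)
--     top = eat if any(p > eat for p in ps) else max(ps)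
--     return splits + top
-- ===== Notes on version B (the rewrite author's own statement) =====
-- stated objective: faster
-- what changed: Replaces A's queue-growing simulation loop (append a remainder per split, one iteration per split) with a one-pass closed form: each plate p>eat contributes (p-1)//eat splits, and the final maximum is eat if any plate exceeds eat else max(ps).
import Mathlib
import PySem

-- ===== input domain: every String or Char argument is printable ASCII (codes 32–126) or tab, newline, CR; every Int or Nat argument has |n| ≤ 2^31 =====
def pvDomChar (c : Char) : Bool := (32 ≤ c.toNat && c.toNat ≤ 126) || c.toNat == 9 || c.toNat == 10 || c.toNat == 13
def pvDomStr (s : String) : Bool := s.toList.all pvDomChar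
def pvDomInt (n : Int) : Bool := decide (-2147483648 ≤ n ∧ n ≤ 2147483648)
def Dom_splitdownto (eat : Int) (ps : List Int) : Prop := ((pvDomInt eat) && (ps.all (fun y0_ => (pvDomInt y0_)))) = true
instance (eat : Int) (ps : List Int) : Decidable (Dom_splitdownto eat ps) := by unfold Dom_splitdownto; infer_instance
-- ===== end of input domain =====

-- B replaces A's queue-growing simulation (one loop iteration per split) with a one-pass
-- closed form: each plate p > eat contributes (p-1)//eat splits, and the final maximum is
-- eat if any plate exceeds eat, else max(ps).

-- ===== PORT A =====
-- A's while loop: grows `plates` while scanning it; ported with fuel that (under Pre_)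
-- bounds the number of iterations (outside Pre_ the Python loop diverges or raises).
def splitLoop (eat : Int) : Nat → List Int → Nat → Int → List Int × Int
  | 0, plates, _, splits => (plates, splits)
  | fuel+1, plates, i, splits =>
    if h : i < plates.length then
      if plates[i] > eat then
        splitLoop eat fuel (plates.set i eat ++ [plates[i] - eat]) (i+1) (splits+1)
      else
        splitLoop eat fuel plates (i+1) splits
    else (plates, splits)

def splitdownto (eat : Int) (ps : List Int) : Int :=
  let r := splitLoop eat (ps.length + (ps.map Int.toNat).sum + 1) ps 0 0
  r.2 + ((PySem.List.max? r.1 (fun y => y)).getD 0)   -- max([]) raises: empty ps excluded by Pre_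

-- ===== PORT B =====
def splitdownto_alt (eat : Int) (ps : List Int) : Int :=
  let splits := ps.foldl (fun s p => if p > eat then s + PySem.Int.floordiv (p - 1) eat else s) 0
  let top := if ps.any (fun p => decide (p > eat)) then eat
             else (PySem.List.max? ps (fun y => y)).getD 0
  splits + top

-- ===== PRECONDITION & SPEC =====
-- Pre_ excludes the empty list (Python's max([]) raises ValueError in both A and B) and
-- eat ≤ 0 with some plate > eat, where A's while loop never terminates.
def Pre_splitdownto (eat : Int) (ps : List Int) : Prop :=
  ps ≠ [] ∧ (0 < eat ∨ ∀ q ∈ ps, q ≤ eat)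
instance (eat : Int) (ps : List Int) : Decidable (Pre_splitdownto eat ps) := by
  unfold Pre_splitdownto; infer_instance

def pvWitness_splitdownto : Int × List Int := (3, [7, 2, 1])

def Spec_splitdownto (eat : Int) (ps : List Int) (out : Int) : Prop := out = splitdownto_alt eat ps
instance (eat : Int) (ps : List Int) (out : Int) : Decidable (Spec_splitdownto eat ps out) := by unfold Spec_splitdownto; infer_instance

-- ===== CLAIM (what is proved, stated in full; the proofs are below) =====
def Claim_equal_splitdownto : Prop := ∀ (eat : Int) (ps : List Int), Dom_splitdownto eat ps → Pre_splitdownto eat ps → Spec_splitdownto eat ps (splitdownto eat ps)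

-- ===== LEMMAS AND PROOFS =====

-- per-plate split count of B's closed form
def gS (eat p : Int) : Int := if p > eat then PySem.Int.floordiv (p - 1) eat else 0

-- max of a nonempty list, Python style; mmax [] = 0 matches (max? []).getD 0
def mmax : List Int → Int
  | [] => 0
  | x :: t => t.foldl max x

lemma mmax_eq_max? (xs : List Int) :
    (PySem.List.max? xs (fun y => y)).getD 0 = mmax xs := by
  cases xs with
  | nil => simp [PySem.List.max?, mmax]
  | cons x t => simp [PySem.List.max?_id_cons, mmax]

lemma mmax_drop_last (L M : List Int) (eat q : Int) (hq : q ≤ eat) :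
    mmax (L ++ eat :: (M ++ [q])) = mmax (L ++ eat :: M) := by
  cases L with
  | nil =>
    simp only [List.nil_append, mmax, List.foldl_append, List.foldl_cons, List.foldl_nil]
    exact max_eq_left (le_trans hq (PySem.List.le_foldl_max M eat).1)
  | cons d ds =>
    show List.foldl max d (ds ++ eat :: (M ++ [q])) = List.foldl max d (ds ++ eat :: M)
    rw [show ds ++ eat :: (M ++ [q]) = (ds ++ eat :: M) ++ [q] by simp, List.foldl_append,
        List.foldl_cons, List.foldl_nil]
    exact max_eq_left (le_trans hq ((PySem.List.le_foldl_max (ds ++ eat :: M) d).2 eat (by simp)))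

-- B's foldl equals the sum of per-plate contributions
lemma foldl_splits (eat : Int) (xs : List Int) (a : Int) :
    xs.foldl (fun s p => if p > eat then s + PySem.Int.floordiv (p - 1) eat else s) a
      = a + (xs.map (gS eat)).sum := by
  induction xs generalizing a with
  | nil => simp
  | cons x t ih =>
    simp only [List.foldl_cons, List.map_cons, List.sum_cons, ih, gS]
    split <;> ring

lemma set_append_len (done : List Int) (p e : Int) (rest : List Int) :
    (done ++ p :: rest).set done.length e = done ++ e :: rest := by
  induction done with
  | nil => simp
  | cons d ds ih => simp [ih]

lemma getElem_append_len (done : List Int) (p : Int) (rest : List Int) (h : done.length < (done ++ p :: rest).length) :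
    (done ++ p :: rest)[done.length] = p := by
  induction done with
  | nil => simp
  | cons d ds ih =>
    simp only [List.cons_append]
    exact ih (by simp)

-- split-count recurrence of the closed form
lemma gS_step (eat p : Int) (he : 0 < eat) (hp : eat < p) :
    gS eat p = 1 + gS eat (p - eat) := by
  unfold gS
  rw [if_pos hp]
  by_cases h2 : eat < p - eat
  · rw [if_pos h2]
    set q := PySem.Int.floordiv (p - eat - 1) eat with hqdef
    have hb := (PySem.Int.floordiv_eq_iff_of_pos (a := p - eat - 1) (b := eat) (q := q) he).mp rfl
    have e1 : (q + 1) * eat = q * eat + eat := by ring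
    have e2 : (q + 1 + 1) * eat = q * eat + eat + eat := by ring
    have : PySem.Int.floordiv (p - 1) eat = q + 1 :=
      (PySem.Int.floordiv_eq_iff_of_pos he).mpr ⟨by rw [e1]; omega, by rw [e2]; omega⟩
    rw [this]; exact add_comm q 1
  · rw [if_neg h2]
    have : PySem.Int.floordiv (p - 1) eat = 1 :=
      (PySem.Int.floordiv_eq_iff_of_pos he).mpr ⟨by omega, by omega⟩
    omega

-- helper: if a is in the list and bounds it, the fold is a
lemma foldl_max_le (a b : Int) (xs : List Int) (ha : a ≤ b) (h : ∀ y ∈ xs, y ≤ b) :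
    xs.foldl max a ≤ b := by
  induction xs generalizing a with
  | nil => simpa
  | cons x t ih =>
    exact ih _ (max_le ha (h x List.mem_cons_self)) (fun y hy => h y (List.mem_cons_of_mem _ hy))

lemma mmax_eq_of_mem (a : Int) (xs : List Int) (hmem : a ∈ xs) (hub : ∀ y ∈ xs, y ≤ a) :
    mmax xs = a := by
  cases xs with
  | nil => simp at hmem
  | cons x t =>
    show List.foldl max x t = a
    refine le_antisymm (foldl_max_le x a t (hub x List.mem_cons_self)
      (fun y hy => hub y (List.mem_cons_of_mem _ hy))) ?_
    rcases List.mem_cons.mp hmem with rfl | h'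
    · exact (PySem.List.le_foldl_max t a).1
    · exact (PySem.List.le_foldl_max t x).2 a h'

-- the loop invariant: processed prefix `done`, remaining queue `todo`
lemma loop_inv (eat : Int) : ∀ (fuel : Nat) (done todo : List Int) (splits : Int),
    (0 < eat ∨ ∀ q ∈ todo, q ≤ eat) →
    todo.length + (todo.map Int.toNat).sum ≤ fuel →
    (splitLoop eat fuel (done ++ todo) done.length splits).2
      + mmax (splitLoop eat fuel (done ++ todo) done.length splits).1
    = splits + (todo.map (gS eat)).sum + mmax (done ++ todo.map (fun p => min p eat)) := by
  intro fuel
  induction fuel with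
  | zero =>
    intro done todo splits _ hfuel
    have : todo = [] := by
      cases todo with
      | nil => rfl
      | cons _ _ => simp at hfuel
    subst this
    simp [splitLoop]
  | succ f ih =>
    intro done todo splits H hfuel
    cases todo with
    | nil => simp [splitLoop]
    | cons p rest =>
      have hlt : done.length < (done ++ p :: rest).length := by simp
      have hget : (done ++ p :: rest)[done.length] = p := getElem_append_len done p rest hlt
      simp only [splitLoop]
      rw [dif_pos hlt]
      simp only [hget]
      by_cases hp : p > eat
      · have he : 0 < eat := by
          rcases H with he | hall
          · exact he
          · exact absurd (hall p (by simp)) (by omega)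
        rw [if_pos hp, set_append_len]
        have hre : (done ++ eat :: rest) ++ [p - eat] = (done ++ [eat]) ++ (rest ++ [p - eat]) := by
          simp
        have hlen : done.length + 1 = (done ++ [eat]).length := by simp
        rw [hre, hlen,
          ih (done ++ [eat]) (rest ++ [p - eat]) (splits + 1) (Or.inl he) (by
            simp only [List.length_append, List.map_append, List.sum_append, List.length_cons,
              List.map_cons, List.sum_cons] at hfuel ⊢
            simp only [List.map_nil, List.sum_nil, List.length_nil]
            omega)]
        have hmapped : (rest ++ [p - eat]).map (fun q => min q eat)
            = rest.map (fun q => min q eat) ++ [min (p - eat) eat] := by simp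
        have hassoc : (done ++ [eat]) ++ (rest.map (fun q => min q eat) ++ [min (p - eat) eat])
            = done ++ eat :: (rest.map (fun q => min q eat) ++ [min (p - eat) eat]) := by simp
        rw [hmapped, hassoc, mmax_drop_last done _ eat _ (min_le_right _ _)]
        have hmin : min p eat = eat := min_eq_right (le_of_lt hp)
        simp only [List.map_cons, List.map_append, List.sum_append, List.sum_cons,
          List.map_nil, List.sum_nil, hmin]
        rw [gS_step eat p he hp]
        ring
      · rw [if_neg hp]
        have hre : done ++ p :: rest = (done ++ [p]) ++ rest := by simp
        have hlen : done.length + 1 = (done ++ [p]).length := by simp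
        have H' : 0 < eat ∨ ∀ q ∈ rest, q ≤ eat := by
          rcases H with he | hall
          · exact Or.inl he
          · exact Or.inr fun q hq => hall q (by simp [hq])
        rw [hre, hlen, ih (done ++ [p]) rest splits H' (by
          simp only [List.length_cons, List.map_cons, List.sum_cons] at hfuel
          omega)]
        have hmin : min p eat = p := min_eq_left (by omega)
        have hassoc : (done ++ [p]) ++ rest.map (fun q => min q eat)
            = done ++ p :: rest.map (fun q => min q eat) := by simp
        rw [hassoc]
        simp only [List.map_cons, List.sum_cons, hmin]
        rw [show gS eat p = 0 from by simp [gS, hp]]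
        ring

-- ===== VERDICT (by name: the statement is the Claim_ definition above) =====
theorem splitdownto_spec : Claim_equal_splitdownto := by
  intro eat ps _ hpre
  simp only [Spec_splitdownto, splitdownto, splitdownto_alt]
  have hloop := loop_inv eat (ps.length + (ps.map Int.toNat).sum + 1) [] ps 0
    hpre.2 (by omega)
  simp only [List.nil_append, List.length_nil] at hloop
  rw [mmax_eq_max?, hloop, foldl_splits, mmax_eq_max?]
  by_cases hany : ps.any (fun p => decide (p > eat))
  · rw [if_pos hany]
    obtain ⟨p0, hp0mem, hp0⟩ := List.any_eq_true.mp hany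
    have hp0' : eat < p0 := by simpa using hp0
    have : mmax (ps.map (fun p => min p eat)) = eat := by
      refine mmax_eq_of_mem eat _ ?_ ?_
      · exact List.mem_map.mpr ⟨p0, hp0mem, min_eq_right (le_of_lt hp0')⟩
      · intro y hy
        obtain ⟨q, _, rfl⟩ := List.mem_map.mp hy
        exact min_le_right _ _
    rw [this]
  · rw [if_neg hany]
    have hall : ∀ p ∈ ps, p ≤ eat := by
      intro p hp
      by_contra hc
      exact hany (List.any_eq_true.mpr ⟨p, hp, by simp; omega⟩)
    have : ps.map (fun p => min p eat) = ps := by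
      rw [List.map_congr_left (fun p hp => min_eq_left (hall p hp))]
      exact List.map_id _
    rw [this]
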